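-- pv_equiv track=rewrite | github.com/MrBrantCode/unitest_baseline | mut_generate/mist_train_cf/cf_59382/solution.py | prime_index_and_value
-- ===== SOURCE A (Python) =====
-- def prime_index_and_value(num_list):
--     if len(num_list) < 2:
--         return []
--
--     def is_prime(n):
--         if not isinstance(n, int) or n < 2:
--             return False
--         for i in range(2, int(n**0.5) + 1):
--             if n % i == 0:
--                 return False
--         return True
--
--     def get_primes_to_n(n):
--         primes = []
--         for possiblePrime in range(2, n + 1):
--             if is_prime(possiblePrime):
--                 primes.append(possiblePrime)
--         return primes
--
--     prime_indices = get_primes_to_n(len(num_list))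
--     prime_list = [num_list[i-1] for i in prime_indices if is_prime(num_list[i-1])]
--
--     return prime_list
-- ===== SOURCE B (Python) =====
-- def prime_index_and_value(num_list):
--     n = len(num_list)
--     if n < 2:
--         return []
--
--     # Sieve: mark every m = p*k with k >= p >= 2 as composite.
--     sieve = [True] * (n + 1)
--     sieve[0] = False
--     sieve[1] = False
--     for p in range(2, n + 1):
--         for m in range(p * p, n + 1, p):
--             sieve[m] = False
--
--     def is_prime_val(v):
--         if v < 2:
--             return False
--         if v == 2:
--             return True
--         if v % 2 == 0:
--             return False
--         f = 3
--         while f * f <= v: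
--             if v % f == 0:
--                 return False
--             f += 2
--         return True
--
--     return [num_list[p - 1] for p in range(2, n + 1)
--             if sieve[p] and is_prime_val(num_list[p - 1])]
-- ===== Notes on version B (the rewrite author's own statement) =====
-- stated objective: faster
-- what changed: Index primes are found by a multiples-marking sieve over [2, n] instead of trial-dividing every candidate index, and each value is tested by dividing only by 2 and odd candidates instead of every candidate up to sqrt(v).
import Mathlib
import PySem

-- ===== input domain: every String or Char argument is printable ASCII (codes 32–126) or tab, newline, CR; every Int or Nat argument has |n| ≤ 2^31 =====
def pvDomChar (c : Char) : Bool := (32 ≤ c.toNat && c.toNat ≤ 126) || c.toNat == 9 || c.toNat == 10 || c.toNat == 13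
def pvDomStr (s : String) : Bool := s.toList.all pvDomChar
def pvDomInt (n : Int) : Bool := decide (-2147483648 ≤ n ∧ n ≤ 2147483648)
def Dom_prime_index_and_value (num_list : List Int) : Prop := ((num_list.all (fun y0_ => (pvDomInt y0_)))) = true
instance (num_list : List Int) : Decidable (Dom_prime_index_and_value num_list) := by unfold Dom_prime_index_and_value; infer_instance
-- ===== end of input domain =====

-- B replaces A's per-candidate trial division over the index range by a multiples-marking
-- sieve and A's per-value trial division by an odd-divisors-only scan (objective: faster).
-- Return values agree on all inputs; neither implementation mutates its argument.

-- ===== PORT A =====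
-- is_prime: trial division over range(2, int(n**0.5)+1); int(n**0.5) equals Nat.sqrt on the
-- domain |n| ≤ 2^31 (double sqrt is exact there), so this port is exact on Dom.
def pvIsPrimeA (n : Int) : Bool :=
  if n < 2 then false
  else (PySem.List.pyRange 2 ((n.toNat.sqrt : Int) + 1) 1).all (fun i => !(PySem.Int.mod n i == 0))

-- get_primes_to_n: append loop over range(2, n+1)
def pvGetPrimesToN (n : Int) : List Int :=
  (PySem.List.pyRange 2 (n + 1) 1).foldl (fun acc p => if pvIsPrimeA p then acc ++ [p] else acc) []

def prime_index_and_value (num_list : List Int) : List Int :=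
  if num_list.length < 2 then []
  else
    (pvGetPrimesToN (num_list.length : Int)).foldl
      (fun acc i =>
        -- num_list[i-1]; i ∈ [2, len] so the index is always in range (none is unreachable)
        match PySem.List.pyGet? num_list (i - 1) with
        | some v => if pvIsPrimeA v then acc ++ [v] else acc
        | none => acc) []

-- ===== PORT B =====
-- while f*f <= v: trial division by odd f = 3, 5, 7, …; v and f are positive ints here,
-- so Python's % is Nat-mod (exact).
def pvOddTrial (v f : Nat) : Bool :=
  if f * f ≤ v then (if v % f == 0 then false else pvOddTrial v (f + 2)) else true
termination_by v + 2 - f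
decreasing_by
  have h2 : f = 0 ∨ f ≤ f * f := by
    rcases Nat.eq_zero_or_pos f with h | h
    · left; omega
    · right; exact Nat.le_mul_of_pos_left f h
  omega

def pvIsPrimeValB (v : Int) : Bool :=
  if v < 2 then false
  else if v == 2 then true
  else if PySem.Int.mod v 2 == 0 then false
  else pvOddTrial v.toNat 3

-- the sieve list after both marking loops; every marked index m ≥ p*p ≥ 4 is nonnegative,
-- so .toNat is exact
def pvSieve (n : Int) : List Bool :=
  (PySem.List.pyRange 2 (n + 1) 1).foldl
    (fun s p => (PySem.List.pyRange (p * p) (n + 1) p).foldl (fun s' m => s'.set m.toNat false) s)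
    (((List.replicate (n + 1).toNat true).set 0 false).set 1 false)

def prime_index_and_value_alt (num_list : List Int) : List Int :=
  if num_list.length < 2 then []
  else
    (PySem.List.pyRange 2 ((num_list.length : Int) + 1) 1).foldl
      (fun acc p =>
        if (pvSieve (num_list.length : Int)).getD p.toNat false then
          -- num_list[p-1]; p ∈ [2, len] so the index is always in range (none is unreachable)
          match PySem.List.pyGet? num_list (p - 1) with
          | some v => if pvIsPrimeValB v then acc ++ [v] else acc
          | none => acc
        else acc) []

-- ===== PRECONDITION & SPEC =====
def Spec_prime_index_and_value (num_list : List Int) (out : List Int) : Prop := out = prime_index_and_value_alt num_list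
instance (num_list : List Int) (out : List Int) : Decidable (Spec_prime_index_and_value num_list out) := by unfold Spec_prime_index_and_value; infer_instance

-- ===== CLAIM (what is proved, stated in full; the proofs are below) =====
def Claim_equal_prime_index_and_value : Prop := ∀ (num_list : List Int), Dom_prime_index_and_value num_list → Spec_prime_index_and_value num_list (prime_index_and_value num_list)

-- ===== LEMMAS AND PROOFS =====

-- the common spec of all three primality tests: m has no divisor q with 2 ≤ q and q*q ≤ m
def pvNSF (m : Nat) : Prop := ∀ q : Nat, 2 ≤ q → q * q ≤ m → ¬ q ∣ m

theorem pvIsPrimeA_iff (n : Int) : pvIsPrimeA n = true ↔ (2 ≤ n ∧ pvNSF n.toNat) := by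
  unfold pvIsPrimeA
  by_cases h : n < 2
  · simp only [if_pos h, Bool.false_eq_true, false_iff, not_and]
    intro h2; omega
  · rw [not_lt] at h
    rw [if_neg (by omega)]
    have hn : ((n.toNat : Int)) = n := Int.toNat_of_nonneg (by omega)
    simp only [List.all_eq_true]
    constructor
    · intro hall
      refine ⟨h, ?_⟩
      intro q hq hqq hdvd
      have hmem : (q : Int) ∈ PySem.List.pyRange 2 ((n.toNat.sqrt : Int) + 1) 1 := by
        rw [PySem.List.mem_pyRange_one]
        have hle : q ≤ n.toNat.sqrt := Nat.le_sqrt.mpr hqq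
        constructor
        · exact_mod_cast hq
        · exact_mod_cast Nat.lt_succ_of_le hle
      have hb := hall _ hmem
      simp only [Bool.not_eq_eq_eq_not, Bool.not_true, beq_eq_false_iff_ne, ne_eq] at hb
      apply hb
      rw [PySem.Int.mod_eq_zero_iff_dvd]
      rw [← hn]
      exact_mod_cast hdvd
    · rintro ⟨-, hnsf⟩
      intro i hi
      rw [PySem.List.mem_pyRange_one] at hi
      obtain ⟨hi2, hiu⟩ := hi
      simp only [Bool.not_eq_eq_eq_not, Bool.not_true, beq_eq_false_iff_ne, ne_eq]
      intro hmod
      rw [PySem.Int.mod_eq_zero_iff_dvd] at hmod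
      have hdn : i.toNat ∣ n.toNat := by
        have : (i.toNat : Int) ∣ (n.toNat : Int) := by
          rw [hn, Int.toNat_of_nonneg (by omega : (0:Int) ≤ i)]; exact hmod
        exact_mod_cast this
      refine hnsf i.toNat (by omega) ?_ hdn
      have hle : i.toNat ≤ n.toNat.sqrt := by omega
      exact Nat.le_sqrt.mp hle

theorem pvOddTrial_iff (v f : Nat) :
    pvOddTrial v f = true ↔ ∀ d : Nat, f ≤ d → d % 2 = f % 2 → d * d ≤ v → ¬ d ∣ v := by
  induction f using pvOddTrial.induct (v := v) with
  | case1 f hle hdvd =>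
    rw [pvOddTrial, if_pos hle, if_pos hdvd]
    simp only [Bool.false_eq_true, false_iff, not_forall, _root_.not_imp, not_not]
    exact ⟨f, le_refl f, rfl, hle, by simpa [Nat.dvd_iff_mod_eq_zero] using (beq_iff_eq.mp hdvd)⟩
  | case2 f hle hdvd ih =>
    rw [pvOddTrial, if_pos hle, if_neg hdvd]
    rw [ih]
    constructor
    · intro hall d hfd hpar hdd hddvd
      rcases Nat.lt_or_ge d (f + 2) with hlt | hge
      · -- d = f or d = f+1; parity rules out f+1, so d = f
        have hdf : d = f := by omega
        subst hdf
        exact hdvd (by simp [Nat.dvd_iff_mod_eq_zero] at hddvd ⊢; omega)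
      · exact hall d hge (by omega) hdd hddvd
    · intro hall d hfd hpar hdd hddvd
      exact hall d (by omega) (by omega) hdd hddvd
  | case3 f hgt =>
    rw [pvOddTrial, if_neg hgt]
    simp only [true_iff]
    intro d hfd _ hdd
    exfalso
    exact hgt (le_trans (Nat.mul_le_mul hfd hfd) hdd)

theorem pvIsPrimeValB_iff (v : Int) : pvIsPrimeValB v = true ↔ (2 ≤ v ∧ pvNSF v.toNat) := by
  unfold pvIsPrimeValB
  by_cases h1 : v < 2
  · simp only [if_pos h1, Bool.false_eq_true, false_iff, not_and]
    intro; omega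
  · rw [not_lt] at h1
    rw [if_neg (by omega)]
    by_cases h2 : v = 2
    · subst h2
      simp only [if_pos (by decide : ((2 : Int) == 2) = true), true_iff]
      refine ⟨by norm_num, ?_⟩
      intro q hq hqq
      have := Nat.mul_le_mul hq hq
      omega
    · rw [if_neg (by simpa using h2)]
      have h3 : (3 : Int) ≤ v := by omega
      by_cases hm : PySem.Int.mod v 2 = 0
      · rw [if_pos (by simpa using hm)]
        rw [PySem.Int.mod_eq_zero_iff_dvd] at hm
        simp only [Bool.false_eq_true, false_iff, not_and]
        intro _ hnsf
        obtain ⟨k, hk⟩ := hm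
        refine hnsf 2 (le_refl 2) (by omega) ?_
        exact ⟨k.toNat, by omega⟩
      · rw [if_neg (by simpa using hm)]
        have hodd : ¬ (2 : Int) ∣ v := by rwa [← PySem.Int.mod_eq_zero_iff_dvd]
        have hoddN : ¬ 2 ∣ v.toNat := by
          intro ⟨k, hk⟩
          exact hodd ⟨(k : Int), by omega⟩
        rw [pvOddTrial_iff]
        constructor
        · intro hall
          refine ⟨by omega, ?_⟩
          intro q hq hqq hdvd
          by_cases hq2 : q % 2 = 0
          · exact hoddN ((Nat.dvd_of_mod_eq_zero hq2).trans hdvd)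
          · exact hall q (by omega) (by omega) hqq hdvd
        · rintro ⟨-, hnsf⟩
          intro d hd hpar hdd
          exact hnsf d (by omega) hdd

theorem pvIsPrimeValB_eq_A (v : Int) : pvIsPrimeValB v = pvIsPrimeA v := by
  rw [Bool.eq_iff_iff, pvIsPrimeValB_iff, pvIsPrimeA_iff]

theorem pvFoldlSet_getD (ms : List Int) (s : List Bool) (i : Nat) :
    (ms.foldl (fun s' m => s'.set m.toNat false) s).getD i false
      = (s.getD i false && !(ms.any fun m => m.toNat == i)) := by
  induction ms generalizing s with
  | nil => simp
  | cons m ms ih =>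
    simp only [List.foldl_cons, List.any_cons, Bool.not_or, ih]
    by_cases hm : m.toNat = i
    · subst hm
      simp [List.getD_eq_getElem?_getD, List.getElem?_set]
      by_cases hl : m.toNat < s.length <;> simp [hl]
    · have hbe : (m.toNat == i) = false := by simp [hm]
      simp [List.getD_eq_getElem?_getD, hm, hbe]

theorem pvFoldlSieve_getD (ps : List Int) (g : Int → List Int) (s : List Bool) (i : Nat) :
    (ps.foldl (fun s' p => (g p).foldl (fun s'' m => s''.set m.toNat false) s') s).getD i false
      = (s.getD i false && !(ps.any fun p => (g p).any fun m => m.toNat == i)) := by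
  induction ps generalizing s with
  | nil => simp
  | cons p ps ih =>
    simp only [List.foldl_cons, List.any_cons, Bool.not_or, ih, pvFoldlSet_getD, Bool.and_assoc]

theorem pvSieve_getD (n q : Int) (hq : 2 ≤ q) (hqn : q < n + 1) :
    ((pvSieve n).getD q.toNat false = true) ↔ pvNSF q.toNat := by
  unfold pvSieve
  rw [pvFoldlSieve_getD]
  have hq0 : ((q.toNat : Int)) = q := Int.toNat_of_nonneg (by omega)
  have hinit : (((List.replicate (n + 1).toNat true).set 0 false).set 1 false).getD q.toNat false = true := by
    have hlt : q.toNat < ((n + 1).toNat) := by omega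
    have h12 : (1:Nat) ≠ q.toNat := by omega
    have h02 : (0:Nat) ≠ q.toNat := by omega
    rw [List.getD_eq_getElem?_getD, List.getElem?_set, if_neg h12, List.getElem?_set, if_neg h02,
      List.getElem?_replicate, if_pos hlt]
    rfl
  rw [hinit, Bool.true_and, Bool.not_eq_eq_eq_not, Bool.not_true, List.any_eq_false]
  constructor
  · intro h q0 h2 hqq hdvd
    have hq0le : q0 ≤ q.toNat := le_trans (Nat.le_mul_of_pos_left q0 (by omega)) hqq
    apply h (q0 : Int)
    · rw [PySem.List.mem_pyRange_one]
      constructor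
      · exact_mod_cast h2
      · omega
    · simp only [List.any_eq_true]
      refine ⟨q, ?_, by simp⟩
      rw [PySem.List.mem_pyRange_iff_of_pos (by exact_mod_cast Nat.lt_of_lt_of_le Nat.zero_lt_two h2)]
      have hc : ((q0 * q0 : Nat) : Int) ≤ q := by rw [← hq0]; exact_mod_cast hqq
      refine ⟨by push_cast at hc ⊢; omega, hqn, ?_⟩
      have hd1 : (q0 : Int) ∣ q := by rw [← hq0]; exact_mod_cast hdvd
      exact dvd_sub hd1 (dvd_mul_left (q0:Int) q0)
  · intro hnsf p hp hany
    rw [PySem.List.mem_pyRange_one] at hp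
    simp only [List.any_eq_true, beq_iff_eq] at hany
    obtain ⟨m, hm, hmq⟩ := hany
    rw [PySem.List.mem_pyRange_iff_of_pos (by omega)] at hm
    obtain ⟨hm1, hm2, hm3⟩ := hm
    have hpp : (0:Int) ≤ p * p := mul_self_nonneg p
    have hmq' : m = q := by omega
    subst hmq'
    have hpd : p ∣ m := by
      have h := dvd_add hm3 (dvd_mul_left p p)
      simpa using h
    have hpq : (p.toNat : Int) = p := Int.toNat_of_nonneg (by omega)
    have hmq2 : (m.toNat : Int) = m := Int.toNat_of_nonneg (by omega)
    refine hnsf p.toNat (by omega) ?_ ?_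
    · have : ((p.toNat * p.toNat : Nat) : Int) ≤ ((m.toNat : Nat) : Int) := by
        push_cast
        rw [hpq, hmq2]
        omega
      exact_mod_cast this
    · have : (p.toNat : Int) ∣ (m.toNat : Int) := by rw [hpq, hmq2]; exact hpd
      exact_mod_cast this

theorem pvMain (num_list : List Int) :
    prime_index_and_value num_list = prime_index_and_value_alt num_list := by
  by_cases hlen : num_list.length < 2
  · unfold prime_index_and_value prime_index_and_value_alt
    rw [if_pos hlen, if_pos hlen]
  · unfold prime_index_and_value prime_index_and_value_alt pvGetPrimesToN
    rw [if_neg hlen, if_neg hlen]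
    have hsome : ∀ i ∈ PySem.List.pyRange 2 ((num_list.length : Int) + 1) 1,
        PySem.List.pyGet? num_list (i - 1)
          = some ((PySem.List.pyGet? num_list (i - 1)).getD 0) := by
      intro i hi
      rw [PySem.List.mem_pyRange_one] at hi
      have h1 : PySem.List.pyGet? num_list (i - 1) ≠ none := by
        rw [Ne, PySem.List.pyGet?_eq_none_iff]
        simp only [PySem.Raise.InRange, not_not]
        omega
      rcases hov : PySem.List.pyGet? num_list (i - 1) with _ | v
      · exact absurd hov h1
      · simp
    rw [PySem.List.foldl_append_if_eq_filter, List.nil_append]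
    have hcongrA :
        (List.filter pvIsPrimeA (PySem.List.pyRange 2 ((num_list.length : Int) + 1) 1)).foldl
          (fun acc i =>
            match PySem.List.pyGet? num_list (i - 1) with
            | some v => if pvIsPrimeA v then acc ++ [v] else acc
            | none => acc) []
        = (List.filter pvIsPrimeA (PySem.List.pyRange 2 ((num_list.length : Int) + 1) 1)).foldl
            (fun acc i =>
              if pvIsPrimeA ((PySem.List.pyGet? num_list (i - 1)).getD 0) then
                acc ++ [(PySem.List.pyGet? num_list (i - 1)).getD 0] else acc) [] := by
      apply PySem.List.foldl_congr_mem
      intro acc i hi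
      rw [hsome i (List.mem_filter.mp hi).1]
      simp
    rw [hcongrA]
    rw [PySem.List.foldl_append_if
        (p := fun i => pvIsPrimeA ((PySem.List.pyGet? num_list (i - 1)).getD 0))
        (f := fun i => (PySem.List.pyGet? num_list (i - 1)).getD 0)]
    have hcongrB :
        (PySem.List.pyRange 2 ((num_list.length : Int) + 1) 1).foldl
          (fun acc p =>
            if (pvSieve (num_list.length : Int)).getD p.toNat false then
              match PySem.List.pyGet? num_list (p - 1) with
              | some v => if pvIsPrimeValB v then acc ++ [v] else acc
              | none => acc
            else acc) []
        = (PySem.List.pyRange 2 ((num_list.length : Int) + 1) 1).foldl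
            (fun acc i =>
              if ((pvSieve (num_list.length : Int)).getD i.toNat false
                  && pvIsPrimeValB ((PySem.List.pyGet? num_list (i - 1)).getD 0)) then
                acc ++ [(PySem.List.pyGet? num_list (i - 1)).getD 0] else acc) [] := by
      apply PySem.List.foldl_congr_mem
      intro acc i hi
      rw [hsome i hi]
      by_cases h1 : (pvSieve (num_list.length : Int)).getD i.toNat false
        <;> by_cases h2 : pvIsPrimeValB ((PySem.List.pyGet? num_list (i - 1)).getD 0)
        <;> simp [h1, h2]
    rw [hcongrB]
    rw [PySem.List.foldl_append_if
        (p := fun i => (pvSieve (num_list.length : Int)).getD i.toNat false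
              && pvIsPrimeValB ((PySem.List.pyGet? num_list (i - 1)).getD 0))
        (f := fun i => (PySem.List.pyGet? num_list (i - 1)).getD 0)]
    rw [List.filter_filter]
    have hfe :
        List.filter
            (fun a => pvIsPrimeA ((PySem.List.pyGet? num_list (a - 1)).getD 0) && pvIsPrimeA a)
            (PySem.List.pyRange 2 ((num_list.length : Int) + 1) 1)
          = List.filter
              (fun i => (pvSieve (num_list.length : Int)).getD i.toNat false
                && pvIsPrimeValB ((PySem.List.pyGet? num_list (i - 1)).getD 0))
              (PySem.List.pyRange 2 ((num_list.length : Int) + 1) 1) := by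
      apply List.filter_congr
      intro i hi
      rw [PySem.List.mem_pyRange_one] at hi
      rw [pvIsPrimeValB_eq_A, Bool.and_comm]
      congr 1
      rw [Bool.eq_iff_iff, pvIsPrimeA_iff, pvSieve_getD _ _ hi.1 hi.2]
      exact ⟨fun h => h.2, fun h => ⟨hi.1, h⟩⟩
    rw [hfe]

-- ===== VERDICT (by name: the statement is the Claim_ definition above) =====
theorem prime_index_and_value_spec : Claim_equal_prime_index_and_value := by
  intro num_list _
  unfold Spec_prime_index_and_value
  exact pvMain num_list
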